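-- pv_equiv track=rewrite | github.com/kashin152/myproject | src/generators.py | card_numbers_generator
-- ===== SOURCE A (Python) =====
-- from typing import Iterable, Iterator
--
-- def card_numbers_generator(start: int, stop: int) -> Iterator[str]:
--     """Генератор номеров банковских карт, который должен генерировать номера карт в формате XXXX XXXX XXXX XXXX,
--     где X — цифра. Должны быть сгенерированы номера карт в заданном диапазоне, например от 0000 0000 0000 0001 до
--     9999 9999 9999 9999 (диапазоны передаются как параметры генератора)."""
--     for num in range(start, stop + 1):
--         number = "0" * (16 - len(str(num))) + str(num)
--
--         string_to_return = ""
--         block_counter = 0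
--
--         for digit in number:
--             block_counter += 1
--             if block_counter <= 4:
--                 string_to_return += digit
--             else:
--                 string_to_return += " " + digit
--                 block_counter = 1
--
--         yield string_to_return
-- ===== SOURCE B (Python) =====
-- from typing import Iterator
--
--
-- def card_numbers_generator(start: int, stop: int) -> Iterator[str]:
--     """Yield card numbers in the range, formatted in space-separated 4-char blocks."""
--     for num in range(start, stop + 1):
--         padded = str(num).rjust(16, "0")
--         blocks = []
--         while padded:
--             blocks.append(padded[:4])
--             padded = padded[4:]
--         yield " ".join(blocks)
-- ===== Notes on version B (the rewrite author's own statement) =====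
-- stated objective: simpler
-- what changed: A's per-character inner loop with a block counter and space-insertion state is replaced by padding via str.rjust and peeling the padded string into 4-character blocks joined with ' '.join, eliminating the counter state entirely.
import Mathlib
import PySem

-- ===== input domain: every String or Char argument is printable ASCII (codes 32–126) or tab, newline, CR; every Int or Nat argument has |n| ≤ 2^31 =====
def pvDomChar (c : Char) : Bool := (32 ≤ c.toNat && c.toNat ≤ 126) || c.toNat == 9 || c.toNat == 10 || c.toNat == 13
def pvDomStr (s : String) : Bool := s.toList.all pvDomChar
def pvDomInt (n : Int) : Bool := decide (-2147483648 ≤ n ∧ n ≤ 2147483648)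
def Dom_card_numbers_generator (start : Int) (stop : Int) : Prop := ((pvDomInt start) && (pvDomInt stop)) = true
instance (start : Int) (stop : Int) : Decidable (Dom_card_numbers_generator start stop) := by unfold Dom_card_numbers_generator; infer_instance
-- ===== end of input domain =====

-- B replaces A's per-digit loop with counter state by a while-loop that peels 4-character
-- blocks off the padded string and joins them with spaces (objective: simpler).

-- ===== PORT A =====
-- Strings are modelled as List Char (PySem convention); the generator's yielded values
-- are collected in order into a List String.
def card_numbers_generator (start : Int) (stop : Int) : List String :=
  (PySem.List.pyRange start (stop + 1) 1).map (fun num =>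
    let s := PySem.Int.toChars num
    -- "0" * (16 - len(str(num))) + str(num); Nat subtraction truncates at 0 exactly like "0" * negative = ""
    let number := List.replicate (16 - s.length) '0' ++ s
    let st := number.foldl
      (fun (st : List Char × Int) digit =>
        let bc := st.2 + 1
        if bc ≤ 4 then (st.1 ++ [digit], bc)
        else (st.1 ++ [' ', digit], 1))
      ([], (0 : Int))
    String.ofList st.1)

-- ===== PORT B =====
-- the while loop of Source B: blocks.append(padded[:4]); padded = padded[4:]
-- (padded[:4] / padded[4:] with nonnegative bounds are exactly take 4 / drop 4)
def pvChunks : List Char → List (List Char)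
  | [] => []
  | d :: t => ((d :: t).take 4) :: pvChunks ((d :: t).drop 4)
termination_by l => l.length
decreasing_by simp

def card_numbers_generator_alt (start : Int) (stop : Int) : List String :=
  (PySem.List.pyRange start (stop + 1) 1).map (fun num =>
    let s := PySem.Int.toChars num
    -- str(num).rjust(16, "0") = "0" * (16 - len) + str(num)
    let padded := List.replicate (16 - s.length) '0' ++ s
    -- " ".join(blocks)
    String.ofList (PySem.Chars.join [' '] (pvChunks padded)))

-- ===== PRECONDITION & SPEC =====
def Spec_card_numbers_generator (start : Int) (stop : Int) (out : List String) : Prop := out = card_numbers_generator_alt start stop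
instance (start : Int) (stop : Int) (out : List String) : Decidable (Spec_card_numbers_generator start stop out) := by unfold Spec_card_numbers_generator; infer_instance

-- ===== CLAIM (what is proved, stated in full; the proofs are below) =====
def Claim_equal_card_numbers_generator : Prop := ∀ (start : Int) (stop : Int), Dom_card_numbers_generator start stop → Spec_card_numbers_generator start stop (card_numbers_generator start stop)

-- ===== LEMMAS AND PROOFS =====

-- state of A's loop after the current block already holds (4 - m) characters:
-- first the next m characters, then every further 4-block preceded by a space
def pvG (l : List Char) (m : Nat) : List Char :=
  l.take m ++ (if l.length ≤ m then [] else (pvChunks (l.drop m)).flatMap (fun c => ' ' :: c))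

theorem pvChunks_nil : pvChunks [] = [] := by rw [pvChunks]

theorem pvChunks_cons (d : Char) (t : List Char) :
    pvChunks (d :: t) = (d :: t).take 4 :: pvChunks ((d :: t).drop 4) := by
  rw [pvChunks]

theorem pvG_nil (m : Nat) : pvG [] m = [] := by simp [pvG]

theorem pvG_succ (d : Char) (t : List Char) (m : Nat) :
    pvG (d :: t) (m + 1) = d :: pvG t m := by
  simp [pvG, List.take_succ_cons]

theorem pvG_zero (d : Char) (t : List Char) :
    pvG (d :: t) 0 = ' ' :: d :: pvG t 3 := by
  have h4 : (d :: t).drop 4 = t.drop 3 := rfl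
  simp only [pvG, List.take_zero, List.nil_append, List.length_cons, Nat.le_zero, List.drop_zero]
  rw [if_neg (by simp), pvChunks_cons, h4, List.flatMap_cons, List.take_succ_cons]
  by_cases h : t.length ≤ 3
  · rw [List.drop_eq_nil_of_le h, pvChunks_nil]
    simp [List.take_of_length_le h]
  · simp [h]

theorem pvLoop (l : List Char) :
    ∀ (acc : List Char) (k : Int), 0 ≤ k → k ≤ 4 →
    (l.foldl
      (fun (st : List Char × Int) digit =>
        let bc := st.2 + 1
        if bc ≤ 4 then (st.1 ++ [digit], bc)
        else (st.1 ++ [' ', digit], 1))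
      (acc, k)).1 = acc ++ pvG l (4 - k).toNat := by
  induction l with
  | nil => intro acc k _ _; simp [pvG_nil]
  | cons d t ih =>
    intro acc k h0 h4
    simp only [List.foldl_cons]
    by_cases h : k + 1 ≤ 4
    · simp only [h, if_pos]
      rw [ih (acc ++ [d]) (k + 1) (by omega) h]
      have hm : (4 - k).toNat = (4 - (k + 1)).toNat + 1 := by omega
      rw [hm, pvG_succ]
      simp
    · have hk : k = 4 := by omega
      subst hk
      simp only [if_neg (by omega : ¬ ((4 : Int) + 1 ≤ 4))]
      rw [ih (acc ++ [' ', d]) 1 (by omega) (by omega)]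
      have : ((4 : Int) - 4).toNat = 0 := by omega
      rw [this, pvG_zero]
      have h3 : ((4 : Int) - 1).toNat = 3 := by omega
      rw [h3]
      simp

theorem pvFlatMap_join (c : List Char) (rest : List (List Char)) :
    (c :: rest).flatMap (fun b => ' ' :: b) = ' ' :: PySem.Chars.join [' '] (c :: rest) := by
  induction rest generalizing c with
  | nil => simp [PySem.Chars.join_singleton]
  | cons c2 r ih =>
    rw [List.flatMap_cons, ih c2, PySem.Chars.join_cons_cons]
    simp

theorem pvJoin_chunks (l : List Char) :
    PySem.Chars.join [' '] (pvChunks l) = pvG l 4 := by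
  cases l with
  | nil => simp [pvChunks_nil, pvG_nil, PySem.Chars.join_nil]
  | cons d t =>
    rw [pvChunks_cons]
    by_cases h : (d :: t).length ≤ 4
    · have hd : (d :: t).drop 4 = [] := List.drop_eq_nil_of_le h
      rw [hd, pvChunks_nil, PySem.Chars.join_singleton]
      simp only [pvG, if_pos h, List.append_nil]
    · obtain ⟨e, u, hcr⟩ := List.exists_cons_of_ne_nil (by
        intro hx
        have := List.drop_eq_nil_iff.mp hx
        omega : (d :: t).drop 4 ≠ [])
      rw [hcr, pvChunks_cons e u, PySem.Chars.join_cons_cons]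
      simp only [pvG, if_neg h]
      rw [hcr, pvChunks_cons e u, pvFlatMap_join]
      simp

-- ===== VERDICT (by name: the statement is the Claim_ definition above) =====
theorem card_numbers_generator_spec : Claim_equal_card_numbers_generator := by
  intro start stop _
  unfold Spec_card_numbers_generator card_numbers_generator card_numbers_generator_alt
  apply List.map_congr_left
  intro num _
  show String.ofList _ = String.ofList _
  rw [pvLoop _ [] 0 (by omega) (by omega)]
  rw [pvJoin_chunks]
  rfl
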